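-- pv_equiv track=rewrite | github.com/rudvfaden/AdventOfCode | 2025/day6/day6.py | extract_numbers_from_cephalopod_section
-- ===== SOURCE A (Python) =====
-- def extract_numbers_from_cephalopod_section(number_rows, operator):
--     """Extract numbers from a problem section reading right-to-left"""
--     if not number_rows or not number_rows[0]:
--         return [], operator
--
--     section_len = len(number_rows[0])
--     numbers = []
--
--     # Read each character position right-to-left
--     for col_idx in range(section_len - 1, -1, -1):
--         digit_string = ""
--         # Read top to bottom at this position
--         for row in number_rows:
--             if col_idx < len(row) and row[col_idx] != ' ':
--                 digit_string += row[col_idx]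
--
--         # If we collected any digits, convert to number
--         if digit_string:
--             numbers.append(int(digit_string))
--
--     return numbers, operator
-- ===== SOURCE B (Python) =====
-- def extract_numbers_from_cephalopod_section(number_rows, operator):
--     """Extract numbers from a problem section reading right-to-left.
--
--     Single row-major pass: collect each column's characters top-to-bottom
--     into a table of column strings, then emit the columns right-to-left.
--     """
--     if not number_rows or not number_rows[0]:
--         return [], operator
--
--     section_len = len(number_rows[0])
--     columns = [""] * section_len
--     for row in number_rows:
--         for idx, ch in enumerate(row):
--             if idx < section_len and ch != ' ':
--                 columns[idx] += ch
--
--     return [int(columns[c]) for c in range(section_len - 1, -1, -1) if columns[c]], operator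
-- ===== Notes on version B (the rewrite author's own statement) =====
-- stated objective: alternative
-- what changed: Replaced the column-major nested scan (for each column, re-scan every row and test its length) by a single row-major pass that accumulates all column strings in one table, then emits them right-to-left.
import Mathlib
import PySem

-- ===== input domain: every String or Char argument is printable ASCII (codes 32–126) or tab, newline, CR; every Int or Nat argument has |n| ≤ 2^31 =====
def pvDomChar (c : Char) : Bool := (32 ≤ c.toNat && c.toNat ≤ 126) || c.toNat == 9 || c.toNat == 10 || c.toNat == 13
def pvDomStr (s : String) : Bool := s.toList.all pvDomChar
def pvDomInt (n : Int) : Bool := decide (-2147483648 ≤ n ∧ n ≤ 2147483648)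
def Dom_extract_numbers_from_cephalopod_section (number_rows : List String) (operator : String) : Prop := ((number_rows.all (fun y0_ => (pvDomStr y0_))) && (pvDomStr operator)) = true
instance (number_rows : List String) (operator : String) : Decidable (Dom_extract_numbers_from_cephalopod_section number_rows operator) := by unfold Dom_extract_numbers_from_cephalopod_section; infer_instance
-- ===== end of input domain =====

-- B replaces A's column-major nested scan by a single row-major pass that builds all
-- column strings at once, then emits them right-to-left (alternative decomposition).

-- ===== PORT A =====
def extract_numbers_from_cephalopod_section (number_rows : List String) (operator : String) : List Int × String :=
  match number_rows with
  | [] => ([], operator)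
  | r0 :: _ =>
    if r0.toList = [] then ([], operator)
    else
      let sectionLen : Int := PySem.Str.len r0
      let numbers : List Int :=
        (PySem.List.pyRange (sectionLen - 1) (-1) (-1)).foldl
          (fun numbers colIdx =>
            let digitString : List Char :=
              number_rows.foldl
                (fun s row =>
                  if colIdx < PySem.Str.len row then
                    match PySem.Str.pyGet? row colIdx with
                    | some ch => if ch ≠ ' ' then s ++ [ch] else s
                    | none => s
                  else s) []
            if digitString ≠ [] then
              -- int(digit_string); Pre_ guarantees it parses, so getD is never the fallback
              numbers ++ [(PySem.Int.ofChars? digitString).getD 0]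
            else numbers) []
      (numbers, operator)

-- ===== PORT B =====
def extract_numbers_from_cephalopod_section_alt (number_rows : List String) (operator : String) : List Int × String :=
  match number_rows with
  | [] => ([], operator)
  | r0 :: _ =>
    if r0.toList = [] then ([], operator)
    else
      let sectionLen : Int := PySem.Str.len r0
      let columns : List (List Char) :=
        number_rows.foldl
          (fun cols row =>
            (PySem.List.enumerate row.toList 0).foldl
              (fun cols p =>
                if p.1 < sectionLen ∧ p.2 ≠ ' ' then
                  cols.modify p.1.toNat (fun col => col ++ [p.2])
                else cols)
              cols)
          (List.replicate sectionLen.toNat [])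
      let numbers : List Int :=
        (PySem.List.pyRange (sectionLen - 1) (-1) (-1)).foldl
          (fun nums c =>
            let col := columns.getD c.toNat []
            if col ≠ [] then nums ++ [(PySem.Int.ofChars? col).getD 0] else nums) []
      (numbers, operator)

-- ===== PRECONDITION & SPEC =====
-- the non-space characters of column c, top to bottom (the string A feeds to int())
def pvContrib (row : List Char) (c : Nat) : List Char :=
  match row[c]? with
  | some ch => if ch ≠ ' ' then [ch] else []
  | none => []

def pvColChars (number_rows : List String) (c : Nat) : List Char :=
  number_rows.flatMap (fun row => pvContrib row.toList c)

-- Pre_ excludes exactly the inputs on which Python's int() raises ValueError: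
-- some column's collected character string is non-empty but not a valid int literal.
def Pre_extract_numbers_from_cephalopod_section (number_rows : List String) (operator : String) : Prop :=
  ∀ c : Nat, c < (number_rows.headD "").toList.length →
    (pvColChars number_rows c = [] ∨ (PySem.Int.ofChars? (pvColChars number_rows c)).isSome)
instance (number_rows : List String) (operator : String) : Decidable (Pre_extract_numbers_from_cephalopod_section number_rows operator) := by unfold Pre_extract_numbers_from_cephalopod_section; infer_instance

def pvWitness_extract_numbers_from_cephalopod_section : List String × String := (["1 3", "2 4"], "+")

def Spec_extract_numbers_from_cephalopod_section (number_rows : List String) (operator : String) (out : List Int × String) : Prop := out = extract_numbers_from_cephalopod_section_alt number_rows operator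
instance (number_rows : List String) (operator : String) (out : List Int × String) : Decidable (Spec_extract_numbers_from_cephalopod_section number_rows operator out) := by unfold Spec_extract_numbers_from_cephalopod_section; infer_instance

-- ===== CLAIM (what is proved, stated in full; the proofs are below) =====
def Claim_equal_extract_numbers_from_cephalopod_section : Prop := ∀ (number_rows : List String) (operator : String), Dom_extract_numbers_from_cephalopod_section number_rows operator → Pre_extract_numbers_from_cephalopod_section number_rows operator → Spec_extract_numbers_from_cephalopod_section number_rows operator (extract_numbers_from_cephalopod_section number_rows operator)

-- ===== LEMMAS AND PROOFS =====

-- one step of A's inner (top-to-bottom) loop appends this row's column-c contribution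
theorem colA_step (c : Nat) (s : List Char) (row : String) :
    (if (c : Int) < PySem.Str.len row then
          match PySem.Str.pyGet? row (c : Int) with
          | some ch => if ch ≠ ' ' then s ++ [ch] else s
          | none => s
        else s) = s ++ pvContrib row.toList c := by
  simp only [PySem.Str.len_eq, PySem.Str.pyGet?_eq, PySem.Chars.pyGet?_eq_listPyGet?,
    PySem.List.pyGet?_natCast, pvContrib]
  cases hg : row.toList[c]? with
  | none =>
    have hge : row.toList.length ≤ c := by
      by_contra h
      rw [List.getElem?_eq_getElem (by omega)] at hg
      simp at hg
    rw [if_neg (show ¬ (c : Int) < (row.toList.length : Int) by exact_mod_cast Nat.not_lt.mpr hge)]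
    simp
  | some ch =>
    have hlt : c < row.toList.length := by
      by_contra h
      rw [List.getElem?_eq_none (by omega)] at hg
      simp at hg
    rw [if_pos (show (c : Int) < (row.toList.length : Int) by exact_mod_cast hlt)]
    by_cases hsp : ch = ' ' <;> simp [hsp]

-- A's inner loop at column c collects exactly pvColChars
theorem colA_eq (rows : List String) (c : Nat) :
    rows.foldl
      (fun s row =>
        if (c : Int) < PySem.Str.len row then
          match PySem.Str.pyGet? row (c : Int) with
          | some ch => if ch ≠ ' ' then s ++ [ch] else s
          | none => s
        else s) []
      = pvColChars rows c := by
  have h := PySem.List.foldl_congr_mem rows _ (fun s row => s ++ pvContrib row.toList c) []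
    (fun s row _ => colA_step c s row)
  rw [h, PySem.List.foldl_append_eq_flatMap, pvColChars]
  simp

-- effect of B's per-row loop (enumerate starting at k) on column c, c < sectionLen
theorem rowStep_getElem? (secLen : Int) (row : List Char) :
    ∀ (k : Nat) (cols : List (List Char)) (c : Nat), (c : Int) < secLen →
    ((PySem.List.enumerate row (k : Int)).foldl
        (fun cols p =>
          if p.1 < secLen ∧ p.2 ≠ ' ' then
            cols.modify p.1.toNat (fun col => col ++ [p.2])
          else cols) cols)[c]?
      = if k ≤ c then cols[c]?.map (· ++ pvContrib row (c - k)) else cols[c]? := by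
  induction row with
  | nil =>
    intro k cols c _
    simp only [PySem.List.enumerate_nil, List.foldl_nil, pvContrib]
    split <;> simp
  | cons ch row' ih =>
    intro k cols c hc
    rw [PySem.List.enumerate_cons, List.foldl_cons]
    have hk1 : ((k : Int) + 1) = ((k + 1 : Nat) : Int) := by push_cast; ring
    rw [hk1, ih (k + 1) _ c hc]
    have hstep_ne : c ≠ k → (if (k : Int) < secLen ∧ ch ≠ ' ' then
          cols.modify ((k : Int)).toNat (fun col => col ++ [ch]) else cols)[c]? = cols[c]? := by
      intro hne
      split
      · rw [Int.toNat_natCast, List.getElem?_modify]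
        have hkc : k ≠ c := fun h => hne h.symm
        simp [hkc]
      · rfl
    by_cases hlt : k < c
    · rw [if_pos (show k + 1 ≤ c by omega), if_pos (show k ≤ c by omega), hstep_ne (by omega)]
      have hcontrib : pvContrib (ch :: row') (c - k) = pvContrib row' (c - (k + 1)) := by
        rw [show c - k = (c - (k + 1)) + 1 by omega]
        simp [pvContrib]
      rw [hcontrib]
    · by_cases heq : c = k
      · subst heq
        rw [if_neg (show ¬ (c + 1 ≤ c) by omega), if_pos (le_refl c), Int.toNat_natCast,
          show c - c = 0 by omega]
        by_cases hsp : ch = ' '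
        · rw [if_neg (by simp [hsp])]
          simp [pvContrib, hsp]
        · rw [if_pos ⟨hc, hsp⟩, List.getElem?_modify]
          cases cols[c]? <;> simp [pvContrib, hsp]
      · rw [if_neg (show ¬ (k + 1 ≤ c) by omega), if_neg (show ¬ (k ≤ c) by omega), hstep_ne heq]

-- effect of B's whole row-major pass on column c
theorem colsFold_getElem? (secLen : Int) :
    ∀ (rows : List String) (cols : List (List Char)) (c : Nat), (c : Int) < secLen →
    (rows.foldl
        (fun cols row =>
          (PySem.List.enumerate row.toList 0).foldl
            (fun cols p =>
              if p.1 < secLen ∧ p.2 ≠ ' ' then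
                cols.modify p.1.toNat (fun col => col ++ [p.2])
              else cols) cols) cols)[c]?
      = cols[c]?.map (· ++ pvColChars rows c) := by
  intro rows
  induction rows with
  | nil => intro cols c _; simp [pvColChars]
  | cons r rows' ih =>
    intro cols c hc
    rw [List.foldl_cons, ih _ c hc]
    rw [show (0 : Int) = ((0 : Nat) : Int) from rfl,
      rowStep_getElem? secLen r.toList 0 cols c hc, if_pos (Nat.zero_le c)]
    simp only [Nat.sub_zero, Option.map_map, pvColChars, List.flatMap_cons]
    cases cols[c]? <;> simp

-- ===== VERDICT (by name: the statement is the Claim_ definition above) =====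
theorem extract_numbers_from_cephalopod_section_spec : Claim_equal_extract_numbers_from_cephalopod_section := by
  intro number_rows operator _hdom _hpre
  unfold Spec_extract_numbers_from_cephalopod_section
  match number_rows with
  | [] => rfl
  | r0 :: rest =>
    simp only [extract_numbers_from_cephalopod_section, extract_numbers_from_cephalopod_section_alt]
    by_cases h0 : r0.toList = []
    · simp [h0]
    · rw [if_neg h0, if_neg h0]
      refine congrArg (fun l => (l, operator)) ?_
      apply PySem.List.foldl_congr_mem
      intro nums colIdx hmem
      rw [PySem.List.mem_pyRange_neg_one] at hmem
      have hlen : PySem.Str.len r0 = (r0.toList.length : Int) := PySem.Str.len_eq r0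
      obtain ⟨hlo, hhi⟩ := hmem
      have h0le : 0 ≤ colIdx := by omega
      set c : Nat := colIdx.toNat with hcdef
      have hcast : colIdx = (c : Int) := by omega
      have hcsec : (c : Int) < PySem.Str.len r0 := by omega
      rw [hcast, colA_eq (r0 :: rest) c]
      have hcols := colsFold_getElem? (PySem.Str.len r0) (r0 :: rest)
        (List.replicate (PySem.Str.len r0).toNat []) c hcsec
      rw [List.getElem?_replicate, if_pos (show c < (PySem.Str.len r0).toNat by omega)] at hcols
      simp only [Option.map_some, List.nil_append] at hcols
      simp only [List.getD_eq_getElem?_getD]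
      rw [hcols]
      simp only [Option.getD_some]
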